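-- pv_equiv track=rewrite | github.com/jmausolf/OpenFEC | fec_download/make_sql.py | create_value_questions
-- ===== SOURCE A (Python) =====
-- def create_value_questions(columns):
-- 	value_questions = ''
-- 	N = len(columns)
-- 	for n in range(0, N):
--
-- 		if n < N-1:
-- 			q = "    ?,\n"
-- 		elif n == N-1:
-- 			q = "    ?"
--
-- 		value_questions = value_questions+q
--
-- 	return value_questions
-- ===== SOURCE B (Python) =====
-- def create_value_questions(columns):
-- 	return ("    ?,\n" * len(columns))[:-2]
-- ===== Notes on version B (the rewrite author's own statement) =====
-- stated objective: simpler
-- what changed: Replaces the index loop with last-element branching by a closed form: repeat the unit block ' ?,\n' len(columns) times and strip the trailing ',\n' with a [:-2] slice.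
import Mathlib
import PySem

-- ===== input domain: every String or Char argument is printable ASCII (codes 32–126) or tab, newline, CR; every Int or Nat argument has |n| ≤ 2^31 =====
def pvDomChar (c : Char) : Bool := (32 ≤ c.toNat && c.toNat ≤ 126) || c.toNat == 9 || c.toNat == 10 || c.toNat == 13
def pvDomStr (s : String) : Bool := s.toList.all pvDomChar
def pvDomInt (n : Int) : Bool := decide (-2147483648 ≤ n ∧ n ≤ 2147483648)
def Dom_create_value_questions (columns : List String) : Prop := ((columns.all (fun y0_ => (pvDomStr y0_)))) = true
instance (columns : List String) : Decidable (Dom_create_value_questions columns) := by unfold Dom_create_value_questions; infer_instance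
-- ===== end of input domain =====

-- B replaces A's index loop (branching on the last index) by a closed form:
-- repeat the unit block len(columns) times and strip the trailing ",\n" with a [:-2] slice.

-- ===== PORT A =====
def create_value_questions (columns : List String) : String :=
  let N : Int := (columns.length : Int)
  (PySem.List.pyRange 0 N 1).foldl
    (fun acc n =>
      acc ++ (if n < N - 1 then "    ?,\n" else if n = N - 1 then "    ?" else "")) ""

-- ===== PORT B =====
def create_value_questions_alt (columns : List String) : String :=
  String.ofList
    (PySem.List.slice (PySem.List.pyRepeat "    ?,\n".toList (columns.length : Int))
      none (some (-2)))

-- ===== PRECONDITION & SPEC =====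
def Spec_create_value_questions (columns : List String) (out : String) : Prop := out = create_value_questions_alt columns
instance (columns : List String) (out : String) : Decidable (Spec_create_value_questions columns out) := by unfold Spec_create_value_questions; infer_instance

-- ===== CLAIM (what is proved, stated in full; the proofs are below) =====
def Claim_equal_create_value_questions : Prop := ∀ (columns : List String), Dom_create_value_questions columns → Spec_create_value_questions columns (create_value_questions columns)

-- ===== LEMMAS AND PROOFS =====

-- Prefix of A's loop: as long as every visited index n satisfies n < Nv, every
-- iteration appends the unit block.
theorem pv_auxA (M : Nat) (Nv : Int) (h : (M : Int) ≤ Nv) (s : String) :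
    ((PySem.List.pyRange 0 (M : Int) 1).foldl
      (fun acc n =>
        acc ++ (if n < Nv then "    ?,\n" else if n = Nv then "    ?" else "")) s).toList
      = s.toList ++ (List.replicate M "    ?,\n".toList).flatten := by
  induction M generalizing s with
  | zero =>
      simp [PySem.List.pyRange_one_eq_nil]
  | succ M ih =>
      have hcast : ((M + 1 : Nat) : Int) = (M : Int) + 1 := by push_cast; ring
      rw [hcast, PySem.List.pyRange_one_succ_right (by positivity), List.foldl_append]
      have hlt : (M : Int) < Nv := by omega
      simp only [List.foldl_cons, List.foldl_nil, if_pos hlt]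
      rw [String.toList_append, ih (by omega)]
      rw [List.replicate_succ' (n := M), List.flatten_append]
      simp

theorem pv_key (M : Nat) :
    ((PySem.List.pyRange 0 (M : Int) 1).foldl
      (fun acc n =>
        acc ++ (if n < (M : Int) - 1 then "    ?,\n" else if n = (M : Int) - 1 then "    ?" else "")) "").toList
      = PySem.List.slice (PySem.List.pyRepeat "    ?,\n".toList (M : Int)) none (some (-2)) := by
  cases M with
  | zero => decide
  | succ M =>
      -- left side
      have hcast : ((M + 1 : Nat) : Int) = (M : Int) + 1 := by push_cast; ring
      rw [hcast, PySem.List.pyRange_one_succ_right (by positivity), List.foldl_append]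
      have hNv : (M : Int) + 1 - 1 = (M : Int) := by ring
      simp only [List.foldl_cons, List.foldl_nil, hNv, lt_irrefl]
      rw [String.toList_append, pv_auxA M (M : Int) le_rfl ""]
      -- right side
      rw [PySem.List.slice_to_neg_ofNat _ 2 (by omega)]
      have hrep : PySem.List.pyRepeat "    ?,\n".toList ((M : Int) + 1)
          = (List.replicate M "    ?,\n".toList).flatten ++ "    ?,\n".toList := by
        have : ((M : Int) + 1).toNat = M + 1 := by omega
        simp [PySem.List.pyRepeat, this, List.replicate_succ' (n := M), List.flatten_append]
      rw [hrep]
      have hlen2 : (((List.replicate M "    ?,\n".toList).flatten ++ "    ?,\n".toList)).length - 2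
          = ((List.replicate M "    ?,\n".toList).flatten).length + 5 := by
        simp

      rw [hlen2, List.take_append]
      simp

-- ===== VERDICT (by name: the statement is the Claim_ definition above) =====
theorem create_value_questions_spec : Claim_equal_create_value_questions := by
  intro columns _
  unfold Spec_create_value_questions create_value_questions create_value_questions_alt
  have h := pv_key columns.length
  have := congrArg String.ofList h
  simpa using this
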